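-- pv_equiv track=rewrite | github.com/wircho/aoc-2023 | 07-1.py | hand_repetition_value
-- ===== SOURCE A (Python) =====
-- coefs = [1, 15, 15 ** 2, 15 ** 3, 15 ** 4, 15 ** 5, 15 ** 6, 15 ** 7, 15 ** 8, 15 ** 9]
--
-- def hand_repetition_value(hand):
--     reps = []
--     while len(hand) > 0:
--         card = hand[0]
--         reps.append(hand.count(card))
--         hand = hand.replace(card, '')
--     reps = sorted(reps)
--     while len(reps) < 5: reps.insert(0, 0)
--     return sum(reps[i] * coefs[i + 5] for i in range(5))
-- ===== SOURCE B (Python) =====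
-- def hand_repetition_value(hand):
--     counts = {}
--     for c in hand:
--         counts[c] = counts.get(c, 0) + 1
--     reps = ([0] * (5 - len(counts)) + sorted(counts.values()))[:5]
--     total = 0
--     w = 15 ** 5
--     for r in reps:
--         total += r * w
--         w *= 15
--     return total
-- ===== Notes on version B (the rewrite author's own statement) =====
-- stated objective: idiomatic
-- what changed: A's while-loop that repeatedly scans and rebuilds the shrinking string (count + replace per distinct card) is replaced by a single-pass frequency dict whose sorted values are front-padded/truncated to five and accumulated with a running weight instead of an indexed coefficient table.
import Mathlib
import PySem

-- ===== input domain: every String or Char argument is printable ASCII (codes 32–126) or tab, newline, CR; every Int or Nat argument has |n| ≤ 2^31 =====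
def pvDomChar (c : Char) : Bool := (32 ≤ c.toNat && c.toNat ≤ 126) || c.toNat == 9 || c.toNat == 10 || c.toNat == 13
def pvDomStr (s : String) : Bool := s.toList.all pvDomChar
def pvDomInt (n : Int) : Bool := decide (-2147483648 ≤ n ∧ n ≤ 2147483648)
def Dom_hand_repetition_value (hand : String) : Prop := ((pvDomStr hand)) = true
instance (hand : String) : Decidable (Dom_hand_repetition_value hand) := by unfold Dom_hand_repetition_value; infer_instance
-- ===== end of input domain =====

-- B replaces A's count-and-delete while-loop (repeated scans of the shrinking string) by a
-- single-pass frequency dict plus a running-weight accumulation (objective: idiomatic).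

-- ===== PORT A =====
def pvCoefs : List Int := [1, 15, 15 ^ 2, 15 ^ 3, 15 ^ 4, 15 ^ 5, 15 ^ 6, 15 ^ 7, 15 ^ 8, 15 ^ 9]

-- the `while len(hand) > 0` loop: card = hand[0]; reps.append(hand.count(card)); hand = hand.replace(card, '')
def pvRepsLoop (hand : List Char) : List Int :=
  match hand with
  | [] => []
  | c :: rest => ((c :: rest).count c : Int) :: pvRepsLoop ((c :: rest).filter (fun x => x ≠ c))
termination_by hand.length
decreasing_by
  have h := List.length_filter_le (fun x => decide (x ≠ c)) rest
  rw [List.filter_cons, if_neg (by simp)]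
  simp only [List.length_cons]
  omega

-- the `while len(reps) < 5: reps.insert(0, 0)` loop
def pvPadLoop (reps : List Int) : List Int :=
  if reps.length < 5 then pvPadLoop ((0 : Int) :: reps) else reps
termination_by 5 - reps.length

def hand_repetition_value (hand : String) : Int :=
  let reps := PySem.List.sorted (pvRepsLoop hand.toList) (fun x => x) false
  let reps := pvPadLoop reps
  -- reps[i] and coefs[i+5]: both indices are always in range here, so getD 0 is exact
  ((PySem.List.pyRange 0 5 1).map
      (fun i => PySem.List.pyGetD reps i 0 * PySem.List.pyGetD pvCoefs (i + 5) 0)).sum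

-- ===== PORT B =====
def hand_repetition_value_alt (hand : String) : Int :=
  let counts := hand.toList.foldl (fun d c => d.insert c (d.getD c 0 + 1)) PySem.Dict.empty
  -- [0] * (5 - len(counts)): Python's repeat of a negative count gives [], Nat subtraction does too
  let reps := (List.replicate (5 - counts.size) (0 : Int) ++
                 PySem.List.sorted counts.values (fun x => x) false).take 5
  (reps.foldl (fun (p : Int × Int) r => (p.1 + r * p.2, p.2 * 15)) (0, 15 ^ 5)).1

-- ===== PRECONDITION & SPEC =====
def Spec_hand_repetition_value (hand : String) (out : Int) : Prop := out = hand_repetition_value_alt hand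
instance (hand : String) (out : Int) : Decidable (Spec_hand_repetition_value hand out) := by unfold Spec_hand_repetition_value; infer_instance

-- ===== CLAIM (what is proved, stated in full; the proofs are below) =====
def Claim_equal_hand_repetition_value : Prop := ∀ (hand : String), Dom_hand_repetition_value hand → Spec_hand_repetition_value hand (hand_repetition_value hand)

-- ===== LEMMAS AND PROOFS =====

theorem pvDiscard_eq_filter {α : Type} [BEq α] (s : List α) (x : α) :
    PySem.Set.discard s x = s.filter (fun y => !(y == x)) := by
  simp [PySem.Set.discard]

theorem pvOfList_filter {α : Type} [BEq α] [LawfulBEq α] (p : α → Bool) (xs : List α) :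
    PySem.Set.ofList (xs.filter p) = (PySem.Set.ofList xs).filter p := by
  induction xs with
  | nil => rfl
  | cons x xs ih =>
    rw [List.filter_cons]
    by_cases hp : p x
    · rw [if_pos hp, PySem.Set.ofList_cons, PySem.Set.ofList_cons, ih,
        List.filter_cons, if_pos hp, pvDiscard_eq_filter, pvDiscard_eq_filter,
        List.filter_filter, List.filter_filter]
      congr 1
      exact List.filter_congr (by intro y _; simp [Bool.and_comm])
    · rw [if_neg hp, PySem.Set.ofList_cons, List.filter_cons, if_neg hp, ih,
        pvDiscard_eq_filter, List.filter_filter]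
      refine (List.filter_congr ?_).symm
      intro y hy
      by_cases h : y = x
      · subst h; simp_all
      · simp [h]

-- A's repetition loop yields the counts of the distinct cards in first-occurrence order
theorem pvRepsLoop_eq_map_dedup (l : List Char) :
    pvRepsLoop l = (PySem.List.dedup l).map (fun k => (l.count k : Int)) := by
  fun_induction pvRepsLoop l with
  | case1 => rfl
  | case2 c rest ih =>
    have hfe : (c :: rest).filter (fun x => decide (x ≠ c)) = rest.filter (fun x => !(x == c)) := by
      rw [List.filter_cons, if_neg (by simp)]
      exact List.filter_congr (by intro y _; by_cases h : y = c <;> simp [h])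
    rw [hfe] at ih ⊢
    rw [ih]
    have hded : PySem.List.dedup (c :: rest)
        = c :: PySem.List.dedup (rest.filter (fun x => !(x == c))) := by
      simp only [PySem.List.dedup_eq_ofList, PySem.Set.ofList_cons, pvOfList_filter,
        pvDiscard_eq_filter]
    rw [hded, List.map_cons]
    refine congrArg₂ _ rfl (List.map_congr_left ?_)
    intro k hk
    have hkmem : k ∈ rest.filter (fun x => !(x == c)) := by
      simpa [PySem.List.dedup_eq_ofList, PySem.Set.mem_ofList] using hk
    have hkc : ¬ (k = c) := by
      have := List.of_mem_filter hkmem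
      simpa using this
    rw [List.count_filter (by simpa using hkc)]
    simp [List.count_cons]
    exact fun h => hkc h.symm

-- B's dict values are exactly the same list
theorem pvValues_counter (l : List Char) :
    (l.foldl (fun d c => d.insert c (d.getD c 0 + 1)) (PySem.Dict.empty : PySem.Dict Char Int)).values
      = (PySem.List.dedup l).map (fun k => (l.count k : Int)) := by
  rw [PySem.Dict.foldl_insert_getD_add_one_eq_counter]
  simp only [PySem.Dict.values, PySem.Dict.items_counter, List.map_map]
  simp [Function.comp, PySem.List.dedup_eq_ofList]

-- B's dict size is the number of distinct cards
theorem pvSize_counter (l : List Char) :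
    (l.foldl (fun d c => d.insert c (d.getD c 0 + 1)) (PySem.Dict.empty : PySem.Dict Char Int)).size
      = (PySem.List.dedup l).length := by
  rw [PySem.Dict.foldl_insert_getD_add_one_eq_counter]
  simp [PySem.Dict.size, PySem.Dict.items_counter, PySem.List.dedup_eq_ofList]

-- padLoop is front-padding with zeros
theorem pvPadLoop_eq (s : List Int) :
    pvPadLoop s = List.replicate (5 - s.length) (0 : Int) ++ s := by
  fun_induction pvPadLoop s with
  | case1 s h ih =>
    rw [ih]
    have h1 : 5 - s.length = (5 - (0 :: s).length) + 1 := by simp; omega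
    rw [h1, List.replicate_succ', List.append_assoc]
    rfl
  | case2 s h =>
    have : 5 - s.length = 0 := by omega
    rw [this]
    rfl

-- on a list of length ≥ 5 the two final accumulations agree
theorem pvFinal_eq' (p : List Int) (hp : 5 ≤ p.length) :
    ((PySem.List.pyRange 0 5 1).map
        (fun i => PySem.List.pyGetD p i 0 * PySem.List.pyGetD pvCoefs (i + 5) 0)).sum
      = ((p.take 5).foldl (fun (q : Int × Int) r => (q.1 + r * q.2, q.2 * 15)) (0, 15 ^ 5)).1 := by
  match p, hp with
  | a :: b :: c :: d :: e :: t, _ =>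
    have hr : PySem.List.pyRange 0 5 1 = [0, 1, 2, 3, 4] := by decide
    rw [hr]
    simp [PySem.List.pyGetD_ofNat', pvCoefs, List.foldl]
    ring

-- the two final accumulations agree on any common sorted list s
theorem pvFinal_eq (s : List Int) :
    ((PySem.List.pyRange 0 5 1).map
        (fun i => PySem.List.pyGetD (pvPadLoop s) i 0 * PySem.List.pyGetD pvCoefs (i + 5) 0)).sum
      = (((List.replicate (5 - s.length) (0 : Int) ++ s).take 5).foldl
          (fun (p : Int × Int) r => (p.1 + r * p.2, p.2 * 15)) (0, 15 ^ 5)).1 := by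
  rw [pvPadLoop_eq]
  exact pvFinal_eq' _ (by simp [List.length_append, List.length_replicate]; omega)

-- ===== VERDICT (by name: the statement is the Claim_ definition above) =====
theorem hand_repetition_value_spec : Claim_equal_hand_repetition_value := by
  intro hand _
  unfold Spec_hand_repetition_value hand_repetition_value hand_repetition_value_alt
  simp only [pvRepsLoop_eq_map_dedup, pvValues_counter, pvSize_counter, pvFinal_eq,
    PySem.List.length_sorted, List.length_map]
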